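-- pv_equiv track=rewrite | github.com/pyta-uoft/pyta | examples/pylint/R0101_too_many_nested_blocks.py | cross_join
-- ===== SOURCE A (Python) =====
-- from typing import List, Tuple, TypeVar, Optional
--
-- T = TypeVar('T')
--
-- def cross_join(x_list: List[Optional[T]], y_list: List[Optional[T]],
--                z_list: List[Optional[T]]) -> List[Tuple[T, T, T]]:
--     """Perform an all-by-all join of all elements in the input lists.
--
--     Note: This function skips elements which are None.
--     """
--     cross_join_list = []
--     for x in x_list:  # Error on this line: "Too many nested blocks"
--         if x is not None:
--             for y in y_list:
--                 if y is not None: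
--                     for z in z_list:
--                         if z is not None:
--                             cross_join_list.append((x, y, z))
--     return cross_join_list
-- ===== SOURCE B (Python) =====
-- from typing import List, Tuple, TypeVar, Optional
--
-- T = TypeVar('T')
--
-- def cross_join(x_list: List[Optional[T]], y_list: List[Optional[T]],
--                z_list: List[Optional[T]]) -> List[Tuple[T, T, T]]:
--     """All-by-all join of the non-None elements, as a recursive n-ary product.
--
--     Filters each list once, then computes the Cartesian product of the pools
--     by recursion on the list of pools: the product of the suffix pools is
--     built once and reused (prepended to) for every value of the head pool.
--     """
--     pools = [[v for v in lst if v is not None] for lst in (x_list, y_list, z_list)]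
--
--     def product_of(ps):
--         if not ps:
--             return [()]
--         rest = product_of(ps[1:])
--         return [(v,) + t for v in ps[0] for t in rest]
--
--     return product_of(pools)
-- ===== Notes on version B (the rewrite author's own statement) =====
-- stated objective: alternative
-- what changed: B filters each list once and then computes the result as a recursive n-ary Cartesian product over the list of pools, building the product of the suffix pools once and prepending each head value to it, instead of three hand-written nested loops with inline None guards.
import Mathlib
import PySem

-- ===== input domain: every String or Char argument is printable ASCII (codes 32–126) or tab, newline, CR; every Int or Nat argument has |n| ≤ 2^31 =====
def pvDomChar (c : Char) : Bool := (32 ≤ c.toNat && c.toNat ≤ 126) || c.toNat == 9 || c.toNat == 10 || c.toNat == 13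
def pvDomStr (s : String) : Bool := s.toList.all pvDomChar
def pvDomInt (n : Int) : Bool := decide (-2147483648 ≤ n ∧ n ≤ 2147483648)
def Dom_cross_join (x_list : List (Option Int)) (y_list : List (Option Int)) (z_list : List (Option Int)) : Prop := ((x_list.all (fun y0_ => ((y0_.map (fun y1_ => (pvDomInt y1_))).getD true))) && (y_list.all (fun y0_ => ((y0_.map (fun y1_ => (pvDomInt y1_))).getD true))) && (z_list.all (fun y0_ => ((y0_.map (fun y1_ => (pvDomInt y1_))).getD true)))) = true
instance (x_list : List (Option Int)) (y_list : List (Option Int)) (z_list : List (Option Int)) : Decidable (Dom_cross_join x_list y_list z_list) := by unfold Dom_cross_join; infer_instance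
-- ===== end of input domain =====

-- B filters each list once and computes a recursive n-ary Cartesian product over the
-- list of pools (suffix product built once, head values prepended), instead of A's
-- nested loops with inline None guards.

-- ===== PORT A =====
-- literal transliteration of A's three nested loops with inline None guards and append
def cross_join (x_list : List (Option Int)) (y_list : List (Option Int)) (z_list : List (Option Int)) : List (Int × Int × Int) :=
  (x_list.foldl (fun acc ox =>
    match ox with
    | none => acc
    | some x =>
      y_list.foldl (fun acc oy =>
        match oy with
        | none => acc
        | some y =>
          z_list.foldl (fun acc oz =>
            match oz with
            | none => acc
            | some z => acc.push (x, y, z)) acc) acc) (#[] : Array (Int × Int × Int))).toList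

-- ===== PORT B =====
-- Source B's recursive product_of over the list of pools; Python's growing tuples are
-- represented as List Int (the tuple-length varies during the recursion), and the
-- final length-3 tuples are read back into the triple type required by the convention.
def pvProductOf : List (List Int) → List (List Int)
  | [] => [[]]
  | p :: ps =>
    let rest := pvProductOf ps
    p.flatMap (fun v => rest.map (fun t => v :: t))

def pvToTriple (l : List Int) : Int × Int × Int :=
  (l.getD 0 0, l.getD 1 0, l.getD 2 0)

def cross_join_alt (x_list : List (Option Int)) (y_list : List (Option Int)) (z_list : List (Option Int)) : List (Int × Int × Int) :=
  let pools := [x_list.filterMap id, y_list.filterMap id, z_list.filterMap id]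
  (pvProductOf pools).map pvToTriple

-- ===== PRECONDITION & SPEC =====
def Spec_cross_join (x_list : List (Option Int)) (y_list : List (Option Int)) (z_list : List (Option Int)) (out : List (Int × Int × Int)) : Prop := out = cross_join_alt x_list y_list z_list
instance (x_list : List (Option Int)) (y_list : List (Option Int)) (z_list : List (Option Int)) (out : List (Int × Int × Int)) : Decidable (Spec_cross_join x_list y_list z_list out) := by unfold Spec_cross_join; infer_instance

-- ===== CLAIM (what is proved, stated in full; the proofs are below) =====
def Claim_equal_cross_join : Prop := ∀ (x_list : List (Option Int)) (y_list : List (Option Int)) (z_list : List (Option Int)), Dom_cross_join x_list y_list z_list → Spec_cross_join x_list y_list z_list (cross_join x_list y_list z_list)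

-- ===== LEMMAS AND PROOFS =====

theorem foldl_z (zs : List (Option Int)) (x y : Int) (acc : Array (Int × Int × Int)) :
    (zs.foldl (fun acc oz => match oz with
      | none => acc
      | some z => acc.push (x, y, z)) acc).toList
    = acc.toList ++ (zs.filterMap id).map (fun z => (x, y, z)) := by
  induction zs generalizing acc with
  | nil => simp
  | cons hd tl ih =>
    cases hd <;> simp [List.foldl_cons, ih]

theorem foldl_y (ys zs : List (Option Int)) (x : Int) (acc : Array (Int × Int × Int)) :
    (ys.foldl (fun acc oy => match oy with
      | none => acc
      | some y => zs.foldl (fun acc oz => match oz with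
          | none => acc
          | some z => acc.push (x, y, z)) acc) acc).toList
    = acc.toList ++ (ys.filterMap id).flatMap (fun y => (zs.filterMap id).map (fun z => (x, y, z))) := by
  induction ys generalizing acc with
  | nil => simp
  | cons hd tl ih =>
    cases hd with
    | none => simpa using ih acc
    | some y =>
      rw [List.foldl_cons]
      dsimp only
      rw [ih, foldl_z]
      simp

theorem foldl_x (xs ys zs : List (Option Int)) (acc : Array (Int × Int × Int)) :
    (xs.foldl (fun acc ox => match ox with
      | none => acc
      | some x => ys.foldl (fun acc oy => match oy with
          | none => acc
          | some y => zs.foldl (fun acc oz => match oz with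
              | none => acc
              | some z => acc.push (x, y, z)) acc) acc) acc).toList
    = acc.toList ++ (xs.filterMap id).flatMap (fun x => (ys.filterMap id).flatMap (fun y => (zs.filterMap id).map (fun z => (x, y, z)))) := by
  induction xs generalizing acc with
  | nil => simp
  | cons hd tl ih =>
    cases hd with
    | none => simpa using ih acc
    | some x =>
      rw [List.foldl_cons]
      dsimp only
      rw [ih, foldl_y]
      simp

theorem alt_eq_flatMap (xs ys zs : List Int) :
    (pvProductOf [xs, ys, zs]).map pvToTriple
    = xs.flatMap (fun x => ys.flatMap (fun y => zs.map (fun z => (x, y, z)))) := by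
  simp [pvProductOf, pvToTriple, List.map_flatMap]
  simp [List.map_eq_flatMap]

-- ===== VERDICT (by name: the statement is the Claim_ definition above) =====
theorem cross_join_spec : Claim_equal_cross_join := by
  intro x_list y_list z_list _
  unfold Spec_cross_join cross_join cross_join_alt
  rw [alt_eq_flatMap]
  simpa using foldl_x x_list y_list z_list #[]
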